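-- pv_equiv track=rewrite | github.com/JerryShum/python_atbs | 6_lists_tuples/coordinate.py | get_end_coordinates
-- ===== SOURCE A (Python) =====
-- def get_end_coordinates(directions):
--
--     x=0
--     y=0
--     for index,value in enumerate(directions):
--         if value == 'e':
--             x+=1
--         elif value == 'w':
--             x-=1
--         elif value == 'n':
--             y+=1
--         else:
--             y -= 1
--
--     return [x,y]
-- ===== SOURCE B (Python) =====
-- def get_end_coordinates(directions):
--     e = directions.count('e')
--     w = directions.count('w')
--     n = directions.count('n')
--     return [e - w, n - (len(directions) - e - w - n)]
-- ===== Notes on version B (the rewrite author's own statement) =====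
-- stated objective: idiomatic
-- what changed: Replaces the per-element if/elif branching loop with three count() tallies and a closed-form combine (the catch-all else is recovered as len minus the e/w/n counts).
import Mathlib
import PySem

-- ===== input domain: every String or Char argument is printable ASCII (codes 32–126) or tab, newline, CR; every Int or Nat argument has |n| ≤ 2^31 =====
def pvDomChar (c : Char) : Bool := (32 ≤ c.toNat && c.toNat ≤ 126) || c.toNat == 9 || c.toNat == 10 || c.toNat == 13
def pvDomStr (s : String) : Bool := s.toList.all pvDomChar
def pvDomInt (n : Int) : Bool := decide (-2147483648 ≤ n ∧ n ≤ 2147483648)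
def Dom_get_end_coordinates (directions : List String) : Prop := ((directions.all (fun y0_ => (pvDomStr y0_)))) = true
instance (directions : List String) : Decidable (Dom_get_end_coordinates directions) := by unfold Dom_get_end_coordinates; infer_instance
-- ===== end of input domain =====

-- B replaces A's per-element if/elif branching loop by count() tallies and a closed-form combine (idiomatic; same cost).

-- ===== PORT A =====
-- literal port of A: enumerate loop with if/elif/else updating (x, y)
def get_end_coordinates (directions : List String) : List Int :=
  let p := (PySem.List.enumerate directions).foldl
    (fun (p : Int × Int) iv =>
      if iv.2 == "e" then (p.1 + 1, p.2)
      else if iv.2 == "w" then (p.1 - 1, p.2)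
      else if iv.2 == "n" then (p.1, p.2 + 1)
      else (p.1, p.2 - 1)) (0, 0)
  [p.1, p.2]

-- ===== PORT B =====
def get_end_coordinates_alt (directions : List String) : List Int :=
  let e : Int := PySem.List.count directions "e"
  let w : Int := PySem.List.count directions "w"
  let n : Int := PySem.List.count directions "n"
  [e - w, n - ((directions.length : Int) - e - w - n)]

-- ===== PRECONDITION & SPEC =====
def Spec_get_end_coordinates (directions : List String) (out : List Int) : Prop := out = get_end_coordinates_alt directions
instance (directions : List String) (out : List Int) : Decidable (Spec_get_end_coordinates directions out) := by unfold Spec_get_end_coordinates; infer_instance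

-- ===== CLAIM (what is proved, stated in full; the proofs are below) =====
def Claim_equal_get_end_coordinates : Prop := ∀ (directions : List String), Dom_get_end_coordinates directions → Spec_get_end_coordinates directions (get_end_coordinates directions)

-- ===== LEMMAS AND PROOFS =====

-- loop invariant: A's fold from accumulator (x, y) adds the count differences
theorem pv_loop (l : List String) (s x y : Int) :
    (PySem.List.enumerate l s).foldl
      (fun (p : Int × Int) iv =>
        if iv.2 == "e" then (p.1 + 1, p.2)
        else if iv.2 == "w" then (p.1 - 1, p.2)
        else if iv.2 == "n" then (p.1, p.2 + 1)
        else (p.1, p.2 - 1)) (x, y)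
    = (x + (l.count "e" : Int) - (l.count "w" : Int),
       y + (l.count "n" : Int) - ((l.length : Int) - (l.count "e" : Int) - (l.count "w" : Int) - (l.count "n" : Int))) := by
  induction l generalizing s x y with
  | nil => simp [PySem.List.enumerate_nil]
  | cons a t ih =>
    rw [PySem.List.enumerate_cons, List.foldl_cons]
    by_cases he : a = "e"
    · simp only [he, beq_self_eq_true]
      rw [ih]
      simp
      ring
    · by_cases hw : a = "w"
      · simp only [hw, show ("w" == "e") = false by decide, beq_self_eq_true]
        rw [ih]
        simp
        constructor <;> ring
      · by_cases hn : a = "n"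
        · simp only [hn, show ("n" == "e") = false by decide, show ("n" == "w") = false by decide,
            beq_self_eq_true]
          rw [ih]
          simp
          ring
        · have he' : (a == "e") = false := by simp [he]
          have hw' : (a == "w") = false := by simp [hw]
          have hn' : (a == "n") = false := by simp [hn]
          simp only [he', hw', hn']
          rw [ih]
          simp [he, hw, hn]
          ring

-- ===== VERDICT (by name: the statement is the Claim_ definition above) =====
theorem get_end_coordinates_spec : Claim_equal_get_end_coordinates := by
  intro directions _
  unfold Spec_get_end_coordinates get_end_coordinates get_end_coordinates_alt
  simp only [PySem.List.count_eq]
  rw [pv_loop]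
  simp
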